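-- pv_equiv track=rewrite | github.com/sdamico/m422 | quantize.py | ScaleFactorBin
-- ===== SOURCE A (Python) =====
-- def ScaleFactorBin(aNum, nScaleBits=3, nMantBits=5):
--     """
--     Return the floating-point scale factor for a  signed fraction aNum given nScaleBits scale bits and nMantBits mantissa bits
--     """
--     #Notes:
--     #The scale factor should be the number of leading zeros
--     #scale = 0 # REMOVE THIS LINE WHEN YOUR FUNCTION IS DONE
--
--     ### YOUR CODE STARTS HERE ###
--     r=2**nScaleBits-1+nMantBits-1#number of bits excluding the sign bit
--     x=abs(aNum)
--     binstr=bin(x)[2:].zfill(r)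
--     count=0#counts zeros
--     for ii in binstr:
--         if ii=='0':
--             count=count+1
--         else:
--             break
--     if count<(2**nScaleBits-1):
--         scale=count
--     else:
--         scale=2**nScaleBits-1
--
--     ### YOUR CODE ENDS HERE ###
--
--     return scale
-- ===== SOURCE B (Python) =====
-- def ScaleFactorBin(aNum, nScaleBits=3, nMantBits=5):
--     """
--     Return the floating-point scale factor for a signed fraction aNum given
--     nScaleBits scale bits and nMantBits mantissa bits.
--     Closed form: leading zeros in an r-bit field = r - bit_length, floored at 0.
--     """
--     r = 2 ** nScaleBits - 1 + nMantBits - 1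
--     count = max(r - abs(aNum).bit_length(), 0)
--     return min(count, 2 ** nScaleBits - 1)
-- ===== Notes on version B (the rewrite author's own statement) =====
-- stated objective: simpler
-- what changed: Replaces building a zero-padded binary string and scanning its characters with a closed form: leading zeros = max(r - bit_length(|aNum|), 0), capped with min at 2**nScaleBits - 1. Pre_ excludes nScaleBits < 0, where A raises TypeError (zfill of a float width), and zfill field widths of 2^35 and above, where A raises while building the padded string (MemoryError at those tens-of-gigabytes allocations, OverflowError once the width exceeds ssize_t).
-- intended difference: On aNum == 0 with nScaleBits >= 1 and field width r = 2**nScaleBits + nMantBits - 2 <= 0 (degenerate nonpositive mantissa budget), A returns 1 because bin(0) still prints one '0' digit even though the field has no bits, while B returns 0, the intended leading-zero count of an empty field. — e.g. on ScaleFactorBin(0, 1, 0): A returns 1, B returns 0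
import Mathlib
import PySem

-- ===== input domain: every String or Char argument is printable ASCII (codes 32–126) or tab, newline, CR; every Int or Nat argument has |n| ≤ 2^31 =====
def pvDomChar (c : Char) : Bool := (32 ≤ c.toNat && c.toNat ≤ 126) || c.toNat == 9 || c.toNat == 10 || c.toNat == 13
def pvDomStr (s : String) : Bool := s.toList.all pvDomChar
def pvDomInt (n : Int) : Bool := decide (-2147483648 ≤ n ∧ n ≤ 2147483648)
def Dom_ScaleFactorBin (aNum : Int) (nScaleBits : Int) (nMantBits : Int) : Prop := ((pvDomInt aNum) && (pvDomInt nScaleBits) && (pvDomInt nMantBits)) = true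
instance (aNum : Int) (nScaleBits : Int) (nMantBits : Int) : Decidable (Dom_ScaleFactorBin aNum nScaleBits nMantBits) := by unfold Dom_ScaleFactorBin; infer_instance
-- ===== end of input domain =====

-- ===== PORT A =====
-- B replaces A's binary-string build-and-scan with a closed form using bit_length (simpler).
-- For nScaleBits < 0 Python A raises TypeError (zfill of a float width); Pre_ excludes that.

-- bin(x)[2:] for x > 0 (MSB first); bin(0)[2:] handled at the call site as "0"
def pvBinDigits : Nat -> List Char
  | n =>
    if h : n = 0 then []
    else pvBinDigits (n / 2) ++ [if n % 2 = 1 then '1' else '0']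
decreasing_by exact Nat.div_lt_self (Nat.pos_of_ne_zero h) (by norm_num)

-- the for-loop over binstr: count starts at 0, is incremented per leading '0', break on else
def pvCountLead : Int -> List Char -> Int
  | count, [] => count
  | count, c :: t => if c = '0' then pvCountLead (count + 1) t else count

def ScaleFactorBin (aNum : Int) (nScaleBits : Int) (nMantBits : Int) : Int :=
  let r : Int := 2 ^ nScaleBits.toNat - 1 + nMantBits - 1
  let x : Nat := aNum.natAbs
  let digits : List Char := if x = 0 then ['0'] else pvBinDigits x
  -- .zfill(r): left-pad with '0' to length r (no-op if r ≤ length)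
  let binstr : List Char := List.replicate (r - (digits.length : Int)).toNat '0' ++ digits
  let count : Int := pvCountLead 0 binstr
  if count < 2 ^ nScaleBits.toNat - 1 then count else 2 ^ nScaleBits.toNat - 1

-- ===== PORT B =====
-- int.bit_length()
def pvBitLen : Nat -> Nat
  | n =>
    if h : n = 0 then 0
    else pvBitLen (n / 2) + 1
decreasing_by exact Nat.div_lt_self (Nat.pos_of_ne_zero h) (by norm_num)

def ScaleFactorBin_alt (aNum : Int) (nScaleBits : Int) (nMantBits : Int) : Int :=
  let r : Int := 2 ^ nScaleBits.toNat - 1 + nMantBits - 1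
  let count : Int := max (r - (pvBitLen aNum.natAbs : Int)) 0
  min count (2 ^ nScaleBits.toNat - 1)

-- ===== PRECONDITION & SPEC =====
-- For nScaleBits < 0, 2**nScaleBits is a float in Python and A raises TypeError at zfill.
-- Pre_ also excludes inputs whose zfill field width r = 2^nScaleBits + nMantBits - 2 is at
-- least 2^35: there A raises while building the padded string (MemoryError at those
-- tens-of-gigabytes allocations, OverflowError once the width exceeds ssize_t).
-- The 'min' caps the exponent so the condition is computable; on Dom it is exact
-- (for nScaleBits ≥ 36 the width bound is unreachable either way).
def Pre_ScaleFactorBin (aNum : Int) (nScaleBits : Int) (nMantBits : Int) : Prop :=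
  0 <= nScaleBits ∧
    (2 : Int) ^ (min nScaleBits.toNat 36) - 1 + nMantBits - 1 < 2 ^ 35
instance (aNum : Int) (nScaleBits : Int) (nMantBits : Int) : Decidable (Pre_ScaleFactorBin aNum nScaleBits nMantBits) := by unfold Pre_ScaleFactorBin; infer_instance
def pvWitness_ScaleFactorBin : Int × Int × Int := (5, 3, 5)

-- On aNum = 0 with nScaleBits >= 1 and field width r = 2^nScaleBits + nMantBits - 2 <= 0
-- (degenerate nonpositive mantissa budget), A returns 1 because bin(0) still prints one '0'
-- digit even though the field has no bits, while B returns 0, the intended leading-zero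
-- count of an empty field.
-- the 'min' caps the exponent so the condition is computable on huge nScaleBits; under
-- Pre_'s width bound nScaleBits.toNat ≤ 35, so the min is the identity and the condition exact.
def D_ScaleFactorBin (aNum : Int) (nScaleBits : Int) (nMantBits : Int) : Prop :=
  aNum = 0 ∧ 1 <= nScaleBits ∧ (2 : Int) ^ (min nScaleBits.toNat 36) + nMantBits <= 2
instance (aNum : Int) (nScaleBits : Int) (nMantBits : Int) : Decidable (D_ScaleFactorBin aNum nScaleBits nMantBits) := by unfold D_ScaleFactorBin; infer_instance

def Spec_ScaleFactorBin (aNum : Int) (nScaleBits : Int) (nMantBits : Int) (out : Int) : Prop := ¬ D_ScaleFactorBin aNum nScaleBits nMantBits → out = ScaleFactorBin_alt aNum nScaleBits nMantBits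
instance (aNum : Int) (nScaleBits : Int) (nMantBits : Int) (out : Int) : Decidable (Spec_ScaleFactorBin aNum nScaleBits nMantBits out) := by unfold Spec_ScaleFactorBin; infer_instance

def pvDiffWitness_ScaleFactorBin : Int × Int × Int := (0, 1, 0)
def pvDiffWitnessOut_ScaleFactorBin : Int × Int := (1, 0)

-- ===== CLAIM (what is proved, stated in full; the proofs are below) =====
def Claim_unchanged_ScaleFactorBin : Prop := ∀ (aNum : Int) (nScaleBits : Int) (nMantBits : Int), Dom_ScaleFactorBin aNum nScaleBits nMantBits → Pre_ScaleFactorBin aNum nScaleBits nMantBits → Spec_ScaleFactorBin aNum nScaleBits nMantBits (ScaleFactorBin aNum nScaleBits nMantBits)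
def Claim_changed_ScaleFactorBin : Prop := Dom_ScaleFactorBin (pvDiffWitness_ScaleFactorBin.1) (pvDiffWitness_ScaleFactorBin.2.1) (pvDiffWitness_ScaleFactorBin.2.2) ∧ Pre_ScaleFactorBin (pvDiffWitness_ScaleFactorBin.1) (pvDiffWitness_ScaleFactorBin.2.1) (pvDiffWitness_ScaleFactorBin.2.2) ∧ D_ScaleFactorBin (pvDiffWitness_ScaleFactorBin.1) (pvDiffWitness_ScaleFactorBin.2.1) (pvDiffWitness_ScaleFactorBin.2.2) ∧ ScaleFactorBin (pvDiffWitness_ScaleFactorBin.1) (pvDiffWitness_ScaleFactorBin.2.1) (pvDiffWitness_ScaleFactorBin.2.2) = pvDiffWitnessOut_ScaleFactorBin.1 ∧ ScaleFactorBin_alt (pvDiffWitness_ScaleFactorBin.1) (pvDiffWitness_ScaleFactorBin.2.1) (pvDiffWitness_ScaleFactorBin.2.2) = pvDiffWitnessOut_ScaleFactorBin.2 ∧ pvDiffWitnessOut_ScaleFactorBin.1 ≠ pvDiffWitnessOut_ScaleFactorBin.2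
def Claim_exact_ScaleFactorBin : Prop := ∀ (aNum : Int) (nScaleBits : Int) (nMantBits : Int), Dom_ScaleFactorBin aNum nScaleBits nMantBits → Pre_ScaleFactorBin aNum nScaleBits nMantBits → D_ScaleFactorBin aNum nScaleBits nMantBits → ScaleFactorBin aNum nScaleBits nMantBits ≠ ScaleFactorBin_alt aNum nScaleBits nMantBits

-- ===== LEMMAS AND PROOFS =====

theorem pvCountLead_replicate (k : Nat) (acc : Int) (l : List Char) :
    pvCountLead acc (List.replicate k '0' ++ l) = pvCountLead (acc + k) l := by
  induction k generalizing acc with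
  | zero => simp
  | succ n ih =>
      simp only [List.replicate_succ, List.cons_append, pvCountLead, if_pos]
      rw [ih]
      congr 1
      push_cast
      ring

theorem pvBinDigits_head (n : Nat) (h : n ≠ 0) : ∃ t, pvBinDigits n = '1' :: t := by
  induction n using Nat.strong_induction_on with
  | _ n ih =>
    rw [pvBinDigits]
    simp only [h, dif_neg, ne_eq, not_false_iff]
    by_cases h2 : n / 2 = 0
    · have hn1 : n = 1 := by omega
      subst hn1
      simp [pvBinDigits]
    · obtain ⟨t, ht⟩ := ih (n / 2) (Nat.div_lt_self (Nat.pos_of_ne_zero h) (by norm_num)) h2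
      exact ⟨t ++ [if n % 2 = 1 then '1' else '0'], by rw [ht]; rfl⟩

theorem pvCountLead_one_cons (acc : Int) (t : List Char) : pvCountLead acc ('1' :: t) = acc := by
  simp [pvCountLead]

theorem pvBinDigits_length (n : Nat) : (pvBinDigits n).length = pvBitLen n := by
  induction n using Nat.strong_induction_on with
  | _ n ih =>
    rw [pvBinDigits, pvBitLen]
    by_cases h : n = 0
    · simp [h]
    · simp only [h, dif_neg, ne_eq, not_false_iff, List.length_append, List.length_cons,
        List.length_nil]
      rw [ih (n / 2) (Nat.div_lt_self (Nat.pos_of_ne_zero h) (by norm_num))]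

theorem ScaleFactorBin_count (aNum : Int) (nScaleBits : Int) (nMantBits : Int) :
    ScaleFactorBin aNum nScaleBits nMantBits =
      (let r : Int := 2 ^ nScaleBits.toNat - 1 + nMantBits - 1
       let count : Int :=
         if aNum.natAbs = 0 then ((r - 1).toNat : Int) + 1
         else max (r - (pvBitLen aNum.natAbs : Int)) 0
       if count < 2 ^ nScaleBits.toNat - 1 then count else 2 ^ nScaleBits.toNat - 1) := by
  simp only [ScaleFactorBin]
  by_cases hx : aNum.natAbs = 0
  · simp only [hx, if_pos, List.length_cons, List.length_nil]
    rw [pvCountLead_replicate]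
    simp [pvCountLead]
  · simp only [hx, if_neg, not_false_iff]
    rw [pvCountLead_replicate]
    obtain ⟨t, ht⟩ := pvBinDigits_head aNum.natAbs hx
    rw [ht, pvCountLead_one_cons, ← ht, pvBinDigits_length]
    have := Int.toNat_eq_max (2 ^ nScaleBits.toNat - 1 + nMantBits - 1 - (pvBitLen aNum.natAbs : Int))
    simp only [this, zero_add]

theorem pvBitLen_zero : pvBitLen 0 = 0 := by rw [pvBitLen]; simp

-- Pre_'s width bound together with Dom's lower bound on nMantBits forces nScaleBits ≤ 35
theorem pvExpSmall (nScaleBits nMantBits : Int) (hm : -2147483648 ≤ nMantBits)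
    (hpr : (2 : Int) ^ (min nScaleBits.toNat 36) - 1 + nMantBits - 1 < 2 ^ 35) :
    min nScaleBits.toNat 36 = nScaleBits.toNat := by
  by_contra h
  have h36 : 36 ≤ nScaleBits.toNat := by
    rcases Nat.le_total nScaleBits.toNat 36 with hle | hle
    · exact absurd (min_eq_left hle) h
    · exact hle
  rw [min_eq_right h36] at hpr
  norm_num at hpr
  omega

-- ===== VERDICT (by name: the statement is the Claim_ definition above) =====
theorem ScaleFactorBin_spec : Claim_unchanged_ScaleFactorBin := by
  intro aNum nScaleBits nMantBits hdom hpre hnd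
  obtain ⟨hp0, hpr⟩ := hpre
  have hm : -2147483648 ≤ nMantBits := by
    simp only [Dom_ScaleFactorBin, pvDomInt, Bool.and_eq_true, decide_eq_true_eq] at hdom
    exact hdom.2.1
  have hmin := pvExpSmall nScaleBits nMantBits hm hpr
  rw [ScaleFactorBin_count]
  unfold ScaleFactorBin_alt
  unfold D_ScaleFactorBin at hnd
  rw [hmin] at hnd
  simp only []
  have hpow : (1 : Int) ≤ 2 ^ nScaleBits.toNat := one_le_pow₀ (by norm_num)
  by_cases hx : aNum.natAbs = 0
  · have ha : aNum = 0 := Int.natAbs_eq_zero.mp hx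
    simp only [hx, if_pos, pvBitLen_zero, Nat.cast_zero, sub_zero]
    by_cases hr : (1 : Int) ≤ 2 ^ nScaleBits.toNat - 1 + nMantBits - 1
    · have : (((2 ^ nScaleBits.toNat - 1 + nMantBits - 1 - 1).toNat : Int)) =
          2 ^ nScaleBits.toNat - 1 + nMantBits - 1 - 1 := Int.toNat_of_nonneg (by omega)
      rw [this]
      rw [max_eq_left (by omega)]
      omega
    · -- r ≤ 0; ¬D forces nScaleBits = 0, so the cap is 0 and both sides return 0
      have hs0 : nScaleBits = 0 := by
        by_contra hs
        exact hnd ⟨ha, by omega, by omega⟩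
      subst hs0
      simp only [Int.toNat_zero, pow_zero] at *
      have : ((( (1 : Int) - 1 + nMantBits - 1 - 1).toNat : Int)) =
          max ((1 : Int) - 1 + nMantBits - 1 - 1) 0 := Int.toNat_eq_max _
      omega
  · simp only [hx, if_neg, not_false_iff]
    omega

theorem ScaleFactorBin_changed : Claim_changed_ScaleFactorBin := by
  unfold Claim_changed_ScaleFactorBin
  refine ⟨by decide, by decide, by decide, by decide, ?_, by decide⟩
  show ScaleFactorBin_alt 0 1 0 = 0
  simp [ScaleFactorBin_alt, pvBitLen]

theorem ScaleFactorBin_tight : Claim_exact_ScaleFactorBin := by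
  intro aNum nScaleBits nMantBits hdom hpre hd
  obtain ⟨hp0, hpr⟩ := hpre
  obtain ⟨ha, hs, hr⟩ := hd
  have hm : -2147483648 ≤ nMantBits := by
    simp only [Dom_ScaleFactorBin, pvDomInt, Bool.and_eq_true, decide_eq_true_eq] at hdom
    exact hdom.2.1
  rw [pvExpSmall nScaleBits nMantBits hm hpr] at hr
  subst ha
  rw [ScaleFactorBin_count]
  unfold ScaleFactorBin_alt
  simp only [Int.natAbs_zero, if_pos, pvBitLen_zero, Nat.cast_zero, sub_zero]
  have hpow : (2 : Int) ≤ 2 ^ nScaleBits.toNat := by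
    calc (2 : Int) = 2 ^ 1 := by norm_num
    _ ≤ 2 ^ nScaleBits.toNat := by
        apply pow_le_pow_right₀ (by norm_num)
        omega
  have htn : (((2 ^ nScaleBits.toNat - 1 + nMantBits - 1 - 1).toNat : Int)) =
      max (2 ^ nScaleBits.toNat - 1 + nMantBits - 1 - 1) 0 := Int.toNat_eq_max _
  omega
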